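-- pv_equiv track=rewrite | github.com/obabichev/acmp-py | acmp/dynamic/183.py | solution
-- ===== SOURCE A (Python) =====
-- def solution(k, p):
--     memo = [0, 0, 1, 1, 2]
--     # memo[0] = 0
--     # memo[1] = 0
--     # memo[2] = 1
--     # memo[3] = 1
--     # memo[4] = 2
--     if k < 5:
--         return memo[k] % p
--     last = memo[4]
--     for i in range(5, k + 1):
--         young = (0 if i % 2 == 1 else memo[i // 2])
--         old = last
--         last = (young + old) % p
--         if i < k // 2 + 1:
--             memo.append(last)
--     return last % p
-- ===== SOURCE B (Python) =====
-- def solution(k, p):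
--     base = [0, 0, 1, 1, 2]
--     if k < 5:
--         return base[k] % p
--     half = k // 2
--     f = base
--     for j in range(5, half + 1):
--         f.append((f[j - 1] + (f[j // 2] if j % 2 == 0 else 0)) % p)
--     return (2 + sum(f[3:half + 1])) % p
-- ===== Notes on version B (the rewrite author's own statement) =====
-- stated objective: faster
-- what changed: B uses the telescoping identity f(k) = 2 + sum_{j=3}^{k//2} f(j): it builds the table only up to k//2 and finishes with one summation of a slice, instead of A's running-accumulator loop over every i up to k.
import Mathlib
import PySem

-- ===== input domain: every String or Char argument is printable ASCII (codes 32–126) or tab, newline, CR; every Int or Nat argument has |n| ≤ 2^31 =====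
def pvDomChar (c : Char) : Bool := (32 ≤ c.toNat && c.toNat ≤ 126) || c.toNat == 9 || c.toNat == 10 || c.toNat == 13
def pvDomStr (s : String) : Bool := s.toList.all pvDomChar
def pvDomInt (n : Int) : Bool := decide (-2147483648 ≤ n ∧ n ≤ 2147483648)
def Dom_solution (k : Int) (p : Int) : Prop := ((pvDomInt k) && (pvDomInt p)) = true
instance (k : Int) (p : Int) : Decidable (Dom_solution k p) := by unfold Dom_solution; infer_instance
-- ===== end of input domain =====

-- B replaces A's running-accumulator loop over 5..k by the telescoping identity
-- f(k) = 2 + Σ_{j=3}^{k//2} f(j): it builds the table only up to k//2 and finishes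
-- with one summation of a slice (measurably faster by a constant factor).

-- ===== PORT A =====
def solution (k : Int) (p : Int) : Int :=
  let memo : List Int := [0, 0, 1, 1, 2]
  if k < 5 then
    PySem.Int.mod (PySem.List.pyGetD memo k 0) p
  else
    -- the loop list is kept as an Array (Python list.append = O(1) push); the index
    -- i // 2 is nonnegative and in range for every i Python visits, so getD/toNat is exact
    let st := (PySem.List.pyRange 5 (k + 1) 1).foldl
      (fun st i =>
        let young : Int :=
          if PySem.Int.mod i 2 == 1 then 0
          else st.1.getD (PySem.Int.floordiv i 2).toNat 0
        let old := st.2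
        let last := PySem.Int.mod (young + old) p
        let memo' := if i < PySem.Int.floordiv k 2 + 1 then st.1.push last else st.1
        (memo', last))
      (memo.toArray, PySem.List.pyGetD memo 4 0)
    PySem.Int.mod st.2 p

-- ===== PORT B =====
def solution_alt (k : Int) (p : Int) : Int :=
  let base : List Int := [0, 0, 1, 1, 2]
  if k < 5 then
    PySem.Int.mod (PySem.List.pyGetD base k 0) p
  else
    let half := PySem.Int.floordiv k 2
    -- the table is kept as an Array (Python list.append = O(1) push); the indices
    -- j - 1 and j // 2 are nonnegative and in range for every j Python visits
    let f := (PySem.List.pyRange 5 (half + 1) 1).foldl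
      (fun f j =>
        f.push (PySem.Int.mod (f.getD (j - 1).toNat 0 +
          (if PySem.Int.mod j 2 == 0 then f.getD (PySem.Int.floordiv j 2).toNat 0 else 0)) p))
      base.toArray
    PySem.Int.mod (2 + (PySem.List.slice f.toList (some 3) (some (half + 1))).sum) p

-- ===== PRECONDITION & SPEC =====
-- Pre_ excludes exactly the inputs where A raises: p = 0 (ZeroDivisionError in '%')
-- and k ≤ -6 (IndexError on memo[k]); B raises there too.
def Pre_solution (k : Int) (p : Int) : Prop := p ≠ 0 ∧ -5 ≤ k
instance (k : Int) (p : Int) : Decidable (Pre_solution k p) := by unfold Pre_solution; infer_instance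
def pvWitness_solution : Int × Int := (10, 7)
def Spec_solution (k : Int) (p : Int) (out : Int) : Prop := out = solution_alt k p
instance (k : Int) (p : Int) (out : Int) : Decidable (Spec_solution k p out) := by unfold Spec_solution; infer_instance

-- ===== CLAIM (what is proved, stated in full; the proofs are below) =====
def Claim_equal_solution : Prop := ∀ (k : Int) (p : Int), Dom_solution k p → Pre_solution k p → Spec_solution k p (solution k p)

-- ===== LEMMAS AND PROOFS =====

-- The mod-p sequence both programs compute: g 0..4 are the memo literals and
-- g n = ((0 if n odd else g (n/2)) + g (n-1)) % p for n ≥ 5.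
def gseq (p : Int) : Nat → Int
  | 0 => 0
  | 1 => 0
  | 2 => 1
  | 3 => 1
  | 4 => 2
  | n + 5 =>
    PySem.Int.mod ((if (n + 5) % 2 = 1 then 0 else gseq p ((n + 5) / 2)) + gseq p (n + 4)) p
decreasing_by all_goals omega

def gtable (p : Int) (t : Nat) : List Int := (List.range (t + 1)).map (gseq p)

def gsum (p : Int) (h : Nat) : Int := ((((List.range (h + 1)).map (gseq p)).drop 3).sum)

theorem gseq_eq (p : Int) (n : Nat) (h : 5 ≤ n) :
    gseq p n = PySem.Int.mod ((if n % 2 = 1 then 0 else gseq p (n / 2)) + gseq p (n - 1)) p := by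
  obtain ⟨m, rfl⟩ : ∃ m, n = m + 5 := ⟨n - 5, by omega⟩
  show gseq p (m + 5) = _
  rw [show m + 5 - 1 = m + 4 from rfl]
  simp only [gseq]

theorem gtable_four (p : Int) : gtable p 4 = [0, 0, 1, 1, 2] := by
  simp [gtable, List.range_succ, gseq]

theorem gtable_getD (p : Int) (t j : Nat) (h : j ≤ t) : (gtable p t).getD j 0 = gseq p j := by
  simpa [gtable] using PySem.List.getD_map_range (gseq p) (t + 1) j 0 (by omega)

theorem gtable_succ (p : Int) (t : Nat) : gtable p (t + 1) = gtable p t ++ [gseq p (t + 1)] := by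
  simp [gtable, List.range_succ]

theorem fmod_add_fmod (a b p : Int) : (a + b.fmod p).fmod p = (a + b).fmod p := by
  conv_lhs => rw [Int.add_fmod, Int.fmod_fmod]
  rw [← Int.add_fmod]

theorem toArray_getD (l : List Int) (n : Nat) (d : Int) : l.toArray.getD n d = l.getD n d := by
  simp only [Array.getD, List.size_toArray, List.getD]
  split
  · rename_i h; simp [List.getElem?_eq_getElem h]
  · rename_i h; simp [List.getElem?_eq_none (by omega : l.length ≤ n)]

theorem A_loop (p : Int) (c : Nat) (hc : 5 ≤ c) (m : Nat) (h4 : 4 ≤ m) (hm : m ≤ c) :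
    (PySem.List.pyRange 5 ((m : Int) + 1) 1).foldl
      (fun st i =>
        let young : Int :=
          if PySem.Int.mod i 2 == 1 then 0
          else st.1.getD (PySem.Int.floordiv i 2).toNat 0
        let old := st.2
        let last := PySem.Int.mod (young + old) p
        let memo' := if i < PySem.Int.floordiv (c : Int) 2 + 1 then st.1.push last else st.1
        (memo', last))
      (([0, 0, 1, 1, 2] : List Int).toArray, (2 : Int))
    = ((gtable p (max 4 (min m (c / 2)))).toArray, gseq p m) := by
  revert hm
  induction m, h4 using Nat.le_induction with
  | base =>
    intro _
    rw [show (((4 : Nat) : Int) + 1) = 5 by norm_num, PySem.List.pyRange_one_eq_nil le_rfl]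
    rw [show max 4 (min 4 (c / 2)) = 4 by omega, gtable_four]
    simp [gseq]
  | succ m h4 ih =>
    intro hm
    rw [show ((m + 1 : Nat) : Int) + 1 = ((m : Int) + 1) + 1 by push_cast; ring,
      PySem.List.pyRange_one_succ_right (by omega), List.foldl_append,
      ih (by omega)]
    simp only [List.foldl_cons, List.foldl_nil]
    have e2 : (m : Int) + 1 = ((m + 1 : Nat) : Int) := by push_cast; ring
    rw [e2, show (2 : Int) = ((2 : Nat) : Int) from rfl]
    simp only [PySem.Int.mod_natCast, PySem.Int.floordiv_natCast, Int.toNat_natCast,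
      toArray_getD]
    have hlast : PySem.Int.mod
        ((if ((((m + 1) % 2 : Nat) : Int) == 1) = true then 0
          else (gtable p (max 4 (min m (c / 2)))).getD ((m + 1) / 2) 0) + gseq p m) p
        = gseq p (m + 1) := by
      rw [gseq_eq p (m + 1) (by omega), show m + 1 - 1 = m from rfl,
        gtable_getD p _ ((m + 1) / 2) (by omega)]
      by_cases hpar : (m + 1) % 2 = 1
      · have hb : ((((m + 1) % 2 : Nat) : Int) == 1) = true := by simp [hpar]
        rw [if_pos hb, if_pos hpar]
      · have h0 : (m + 1) % 2 = 0 := by omega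
        have hb : ¬ ((((m + 1) % 2 : Nat) : Int) == 1) = true := by simp [h0]
        rw [if_neg hb, if_neg hpar]
    rw [hlast]
    simp only [Prod.mk.injEq]
    refine ⟨?_, trivial⟩
    by_cases happ : m + 1 ≤ c / 2
    · rw [if_pos (by omega : ((m + 1 : Nat) : Int) < ((c / 2 : Nat) : Int) + 1)]
      rw [show max 4 (min m (c / 2)) = m by omega,
        show max 4 (min (m + 1) (c / 2)) = m + 1 by omega, List.push_toArray, gtable_succ]
    · rw [if_neg (by omega : ¬ ((m + 1 : Nat) : Int) < ((c / 2 : Nat) : Int) + 1)]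
      rw [show max 4 (min (m + 1) (c / 2)) = max 4 (min m (c / 2)) by omega]

theorem B_loop (p : Int) (m : Nat) :
    (PySem.List.pyRange 5 ((m : Int) + 1) 1).foldl
      (fun f j =>
        f.push (PySem.Int.mod (f.getD (j - 1).toNat 0 +
          (if PySem.Int.mod j 2 == 0 then f.getD (PySem.Int.floordiv j 2).toNat 0 else 0)) p))
      ([0, 0, 1, 1, 2] : List Int).toArray
    = (gtable p (max 4 m)).toArray := by
  induction m with
  | zero =>
    rw [PySem.List.pyRange_one_eq_nil (by norm_num)]
    simpa using congrArg List.toArray (gtable_four p).symm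
  | succ m ih =>
    rcases Nat.lt_or_ge m 4 with h4 | h4
    · rw [PySem.List.pyRange_one_eq_nil (by omega)]
      rw [show max 4 (m + 1) = 4 by omega]
      simpa using congrArg List.toArray (gtable_four p).symm
    · rw [show ((m + 1 : Nat) : Int) + 1 = ((m : Int) + 1) + 1 by push_cast; ring,
        PySem.List.pyRange_one_succ_right (by omega), List.foldl_append, ih]
      simp only [List.foldl_cons, List.foldl_nil]
      rw [Nat.max_eq_right h4, Nat.max_eq_right (by omega : 4 ≤ m + 1)]
      have e1 : (m : Int) + 1 - 1 = ((m : Nat) : Int) := by ring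
      rw [e1]
      have e2 : (m : Int) + 1 = ((m + 1 : Nat) : Int) := by push_cast; ring
      rw [e2, show (2 : Int) = ((2 : Nat) : Int) from rfl]
      simp only [PySem.Int.mod_natCast, PySem.Int.floordiv_natCast, Int.toNat_natCast,
        toArray_getD]
      rw [gtable_getD p m m le_rfl, List.push_toArray, gtable_succ,
        gseq_eq p (m + 1) (by omega), show m + 1 - 1 = m from rfl]
      by_cases hpar : (m + 1) % 2 = 1
      · have : ¬ ((((m + 1) % 2 : Nat) : Int) == 0) = true := by
          simp [hpar]
        simp only [this, Bool.false_eq_true, if_false, if_pos hpar]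
        rw [Int.add_zero, Int.zero_add]
      · have hc : (((m + 1) % 2 : Nat) : Int) == 0 := by
          have : (m + 1) % 2 = 0 := by omega
          simp [this]
        rw [if_pos hc, if_neg hpar, gtable_getD p m ((m + 1) / 2) (by omega),
          Int.add_comm]

theorem gsum_succ (p : Int) (h : Nat) (hh : 2 ≤ h) :
    gsum p (h + 1) = gsum p h + gseq p (h + 1) := by
  have hlen : 3 ≤ ((List.range (h + 1)).map (gseq p)).length := by simp; omega
  unfold gsum
  rw [List.range_succ (n := h + 1), List.map_append, List.drop_append_of_le_length hlen,
    List.sum_append]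
  simp

theorem gseq_telescope (p : Int) (c : Nat) (hc : 5 ≤ c) :
    gseq p c = PySem.Int.mod (2 + gsum p (c / 2)) p := by
  induction c, hc using Nat.le_induction with
  | base =>
    show gseq p 5 = _
    have h2 : gsum p 2 = 0 := by simp [gsum, List.range_succ]
    simp [gseq, h2, PySem.Int.mod]
  | succ c hc ih =>
    rw [gseq_eq p (c + 1) (by omega), show c + 1 - 1 = c from rfl, ih]
    by_cases hpar : (c + 1) % 2 = 1
    · have hdiv : (c + 1) / 2 = c / 2 := by omega
      simp only [hpar, if_pos, hdiv, zero_add, PySem.Int.mod, Int.fmod_fmod]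
    · have hdiv : (c + 1) / 2 = c / 2 + 1 := by omega
      simp only [PySem.Int.mod, if_neg hpar]
      rw [fmod_add_fmod, hdiv, gsum_succ p (c / 2) (by omega)]
      ring_nf

theorem slice_sum (p : Int) (h : Nat) (hh : 2 ≤ h) :
    (PySem.List.slice (gtable p (max 4 h)) (some 3) (some ((h : Int) + 1))).sum = gsum p h := by
  rw [show ((h : Int) + 1) = (((h + 1 : Nat)) : Int) by push_cast; ring,
    show (3 : Int) = ((3 : Nat) : Int) from rfl, PySem.List.slice_natCast]
  rcases Nat.lt_or_ge h 4 with h4 | h4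
  · interval_cases h <;> simp [gtable_four, gsum, List.range_succ, gseq]
  · rw [Nat.max_eq_right (by omega)]
    have hlen : ((gtable p h).drop 3).length = h - 2 := by simp [gtable]
    rw [List.take_of_length_le (by omega)]
    rfl

-- ===== VERDICT (by name: the statement is the Claim_ definition above) =====
theorem solution_spec : Claim_equal_solution := by
  intro k p _ _
  show solution k p = solution_alt k p
  by_cases hk : k < 5
  · simp only [solution, solution_alt, if_pos hk]
  · have hk5 : 5 ≤ k := by omega
    obtain ⟨c, rfl⟩ : ∃ c : Nat, k = (c : Int) := ⟨k.toNat, by omega⟩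
    have hc : 5 ≤ c := by exact_mod_cast hk5
    simp only [solution, solution_alt, if_neg hk]
    rw [show PySem.List.pyGetD ([0, 0, 1, 1, 2] : List Int) 4 0 = (2 : Int) from by decide]
    rw [A_loop p c hc c (by omega) le_rfl]
    have hfd : PySem.Int.floordiv ((c : Nat) : Int) 2 = ((c / 2 : Nat) : Int) := by
      rw [show (2 : Int) = ((2 : Nat) : Int) from rfl, PySem.Int.floordiv_natCast]
    rw [hfd, B_loop p (c / 2), List.toList_toArray, slice_sum p (c / 2) (by omega),
      gseq_telescope p c hc]
    simp [PySem.Int.mod]
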